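-- pv_equiv track=rewrite | github.com/pypi-data/pypi-mirror-361 | packages/agent-reward-bench/agent_reward_bench-0.1.2.tar.gz/agent_reward_bench-0.1.2/agent_reward_bench/judge/__init__.py | parse_aer_judgment
-- ===== SOURCE A (Python) =====
-- def parse_aer_judgment(response_msg: dict):
--     judgment = {
--         "reasoning": None,
--         "trajectory_success": None,
--         "trajectory_side_effect": "n/a",
--         "trajectory_optimality": "n/a",
--         "trajectory_looping": "n/a",
--     }
--     for line in response_msg.split("\n"):
--         if line.startswith("Thoughts:"):
--             splitted = line.split(":", 1)
--             if len(splitted) == 2: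
--                 judgment["reasoning"] = splitted[1].strip()
--         elif line.startswith("Status:"):
--             splitted = line.split(":", 1)
--             if len(splitted) == 2:
--                 judgment["trajectory_success"] = splitted[1].strip()
--
--     return judgment
-- ===== SOURCE B (Python) =====
-- def parse_aer_judgment(response_msg):
--     fields = {}
--     for line in response_msg.split("\n"):
--         if ":" in line:
--             label, value = line.split(":", 1)
--             fields[label] = value.strip()
--     return {
--         "reasoning": fields.get("Thoughts"),
--         "trajectory_success": fields.get("Status"),
--         "trajectory_side_effect": "n/a",
--         "trajectory_optimality": "n/a",
--         "trajectory_looping": "n/a",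
--     }
-- ===== Notes on version B (the rewrite author's own statement) =====
-- stated objective: alternative
-- what changed: Replaces the branch-per-field scan (startswith checks inside the loop) with a build-a-table decomposition: one pass splits every colon line into label->stripped value in a dict (later lines overwrite), then the result is assembled by looking up 'Thoughts' and 'Status' in that table.
import Mathlib
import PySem

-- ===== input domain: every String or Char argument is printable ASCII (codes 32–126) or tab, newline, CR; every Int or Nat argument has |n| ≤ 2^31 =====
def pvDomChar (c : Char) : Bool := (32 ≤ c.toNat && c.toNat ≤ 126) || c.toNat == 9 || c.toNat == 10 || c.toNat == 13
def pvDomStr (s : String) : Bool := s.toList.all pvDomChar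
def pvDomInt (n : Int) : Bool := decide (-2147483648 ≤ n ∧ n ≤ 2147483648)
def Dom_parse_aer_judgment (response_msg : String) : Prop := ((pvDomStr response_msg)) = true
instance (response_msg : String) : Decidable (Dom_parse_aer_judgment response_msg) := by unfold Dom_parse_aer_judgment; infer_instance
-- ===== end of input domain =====

-- B assembles the result from a generic label→value table built in one colon-splitting pass,
-- instead of A's branch-per-field startswith scan; objective: alternative decomposition (same cost).

-- ===== PORT A =====
-- loop body of A's `for line in response_msg.split("\n")`; the two-element pattern match is
-- `splitted = line.split(":", 1); if len(splitted) == 2: … splitted[1] …` (split(":", 1) yields 1 or 2 parts)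
def stepA (j : PySem.Dict String (Option String)) (line : String) : PySem.Dict String (Option String) :=
  if PySem.Str.startswith line "Thoughts:" then
    match PySem.Str.splitMax? line ":" 1 with
    | some [_, v] => j.insert "reasoning" (some (PySem.Str.strip v))
    | _ => j
  else if PySem.Str.startswith line "Status:" then
    match PySem.Str.splitMax? line ":" 1 with
    | some [_, v] => j.insert "trajectory_success" (some (PySem.Str.strip v))
    | _ => j
  else j

def parse_aer_judgment (response_msg : String) : List (String × Option String) :=
  let init : PySem.Dict String (Option String) := PySem.Dict.mk
    [("reasoning", none), ("trajectory_success", none),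
     ("trajectory_side_effect", some "n/a"), ("trajectory_optimality", some "n/a"),
     ("trajectory_looping", some "n/a")]
  let lines := (PySem.Str.split? response_msg "\n").getD []
  (lines.foldl stepA init).items

-- ===== PORT B =====
-- loop body of B's table-building pass; the two-element pattern is `label, value = line.split(":", 1)`
def stepB (d : PySem.Dict String String) (line : String) : PySem.Dict String String :=
  if PySem.Str.isIn ":" line then
    match PySem.Str.splitMax? line ":" 1 with
    | some [label, value] => d.insert label (PySem.Str.strip value)
    | _ => d
  else d

def parse_aer_judgment_alt (response_msg : String) : List (String × Option String) :=
  let lines := (PySem.Str.split? response_msg "\n").getD []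
  let fields := lines.foldl stepB PySem.Dict.empty
  [("reasoning", fields.get? "Thoughts"),
   ("trajectory_success", fields.get? "Status"),
   ("trajectory_side_effect", some "n/a"),
   ("trajectory_optimality", some "n/a"),
   ("trajectory_looping", some "n/a")]

-- ===== PRECONDITION & SPEC =====
def Spec_parse_aer_judgment (response_msg : String) (out : List (String × Option String)) : Prop := out = parse_aer_judgment_alt response_msg
instance (response_msg : String) (out : List (String × Option String)) : Decidable (Spec_parse_aer_judgment response_msg out) := by unfold Spec_parse_aer_judgment; infer_instance

-- ===== CLAIM (what is proved, stated in full; the proofs are below) =====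
def Claim_equal_parse_aer_judgment : Prop := ∀ (response_msg : String), Dom_parse_aer_judgment response_msg → Spec_parse_aer_judgment response_msg (parse_aer_judgment response_msg)

-- ===== LEMMAS AND PROOFS =====

-- the label (text before the first colon) and remainder (text after it) of a line
def preC (cs : List Char) : List Char := cs.takeWhile (· ≠ ':')
def postC (cs : List Char) : List Char := (cs.dropWhile (· ≠ ':')).tail

lemma go_zero (fuel : Nat) (l cur : List Char) (acc : List (List Char)) :
    PySem.Chars.splitOnMax.go [':'] fuel 0 l cur acc = ((cur.reverse ++ l) :: acc).reverse := by
  cases fuel with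
  | zero => simp [PySem.Chars.splitOnMax.go]
  | succ f => cases l with
    | nil => simp [PySem.Chars.splitOnMax.go]
    | cons c r => simp [PySem.Chars.splitOnMax.go]

lemma go_one (l : List Char) (fuel : Nat) (cur : List Char) (acc : List (List Char))
    (h : l.length < fuel) :
    PySem.Chars.splitOnMax.go [':'] fuel 1 l cur acc =
      if ':' ∈ l then acc.reverse ++ [cur.reverse ++ preC l, postC l]
      else acc.reverse ++ [cur.reverse ++ l] := by
  induction l generalizing fuel cur acc with
  | nil =>
    cases fuel with
    | zero => omega
    | succ f => simp [PySem.Chars.splitOnMax.go]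
  | cons c r ih =>
    cases fuel with
    | zero => omega
    | succ f =>
      by_cases hc : c = ':'
      · subst hc
        simp [PySem.Chars.splitOnMax.go, List.isPrefixOf, go_zero, preC, postC]
      · have : [':'].isPrefixOf (c :: r) = false := by
          simp [List.isPrefixOf]; exact fun h => absurd h.symm hc
        simp only [PySem.Chars.splitOnMax.go, this]
        rw [ih f (c :: cur) acc (by simpa using Nat.lt_of_succ_lt_succ h)]
        have hp : preC (c :: r) = c :: preC r := by simp [preC, hc]
        have hq : postC (c :: r) = postC r := by simp [postC, hc]
        by_cases hr : ':' ∈ r <;> simp [hp, hq, hr, Ne.symm hc]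

lemma splitMax_one (line : String) :
    PySem.Str.splitMax? line ":" 1 =
      some (if ':' ∈ line.toList
            then [String.ofList (preC line.toList), String.ofList (postC line.toList)]
            else [line]) := by
  have h1 : (":" : String).toList = [':'] := by decide
  simp only [PySem.Str.splitMax?, h1, PySem.Chars.splitMax?, PySem.Chars.splitOnMax]
  rw [if_neg (by decide), if_neg (by norm_num)]
  rw [show ((1 : Int).toNat) = 1 from rfl]
  rw [go_one _ _ _ _ (Nat.lt_succ_self _)]
  by_cases hm : ':' ∈ line.toList <;> simp [hm, String.ofList]

lemma key_iff (cs key : List Char) (hk : ':' ∉ key) :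
    List.isPrefixOf (key ++ [':']) cs = true ↔ (':' ∈ cs ∧ preC cs = key) := by
  induction cs generalizing key with
  | nil => simp
  | cons c r ih =>
    cases key with
    | nil =>
      by_cases hc : c = ':'
      · subst hc; simp [List.isPrefixOf, preC]
      · have hL : ([':'] : List Char).isPrefixOf (c :: r) = false := by
          simp [List.isPrefixOf]; exact fun h => absurd h.symm hc
        rw [List.nil_append, hL]
        simp [preC, hc]
    | cons k key' =>
      have hk1 : k ≠ ':' := by intro h; exact hk (by simp [h])
      have hk2 : ':' ∉ key' := fun h => hk (by simp [h])
      by_cases hc : c = k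
      · subst hc
        simp only [List.cons_append, List.isPrefixOf, beq_self_eq_true, Bool.true_and]
        rw [ih key' hk2]
        have hcne : c ≠ ':' := hk1
        simp only [preC, List.takeWhile_cons]
        simp [hcne, Ne.symm hcne]
      · by_cases h2 : c = ':'
        · subst h2
          simp only [List.cons_append, List.isPrefixOf]
          simp [preC]
          intro h; exact absurd h.symm hc
        · simp only [List.cons_append, List.isPrefixOf]
          have : (k == c) = false := by simp [Ne.symm hc]
          simp [this, preC, h2, Ne.symm h2, hc]

-- A's judgment dict as a function of its two mutable fields
def mkJ (r s : Option String) : PySem.Dict String (Option String) := PySem.Dict.mk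
  [("reasoning", r), ("trajectory_success", s),
   ("trajectory_side_effect", some "n/a"), ("trajectory_optimality", some "n/a"),
   ("trajectory_looping", some "n/a")]

lemma mkJ_insert_r (r s v : Option String) : (mkJ r s).insert "reasoning" v = mkJ v s := by
  simp [mkJ, PySem.Dict.insert, PySem.Dict.contains]
lemma mkJ_insert_s (r s v : Option String) : (mkJ r s).insert "trajectory_success" v = mkJ r v := by
  simp [mkJ, PySem.Dict.insert, PySem.Dict.contains]

lemma ofList_eq_iff (l : List Char) (s : String) : String.ofList l = s ↔ l = s.toList := by
  constructor
  · intro h; rw [← h]; exact String.ofList_eq.mp rfl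
  · intro h; subst h; exact String.ofList_toList

lemma startswith_key (line : String) (key tail : String) (h : key.toList = tail.toList ++ [':'])
    (hk : ':' ∉ tail.toList) :
    PySem.Str.startswith line key = true ↔ (':' ∈ line.toList ∧ preC line.toList = tail.toList) := by
  rw [show PySem.Str.startswith line key = PySem.Chars.startswith line.toList key.toList from by simp,
    PySem.Chars.startswith, h]
  exact key_iff _ _ hk

lemma isIn_colon (line : String) : PySem.Str.isIn ":" line = true ↔ ':' ∈ line.toList := by
  rw [PySem.Str.isIn_iff_infix]
  exact List.singleton_infix_iff ':' line.toList

lemma step_eq (line : String) (d : PySem.Dict String String) :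
    stepA (mkJ (d.get? "Thoughts") (d.get? "Status")) line
      = mkJ ((stepB d line).get? "Thoughts") ((stepB d line).get? "Status") := by
  have hT := startswith_key line "Thoughts:" "Thoughts" (by decide) (by decide)
  have hS := startswith_key line "Status:" "Status" (by decide) (by decide)
  unfold stepA stepB
  by_cases hm : ':' ∈ line.toList
  · rw [if_pos ((isIn_colon line).mpr hm), splitMax_one line, if_pos hm]
    by_cases h1 : preC line.toList = ("Thoughts" : String).toList
    · rw [if_pos (hT.mpr ⟨hm, h1⟩)]
      have hl : String.ofList (preC line.toList) = "Thoughts" := (ofList_eq_iff _ _).mpr h1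
      rw [hl]
      rw [PySem.Dict.get?_insert_self, PySem.Dict.get?_insert_of_ne _ _ (by decide)]
      exact mkJ_insert_r _ _ _
    · rw [if_neg (by rw [hT]; exact fun h => h1 h.2)]
      by_cases h2 : preC line.toList = ("Status" : String).toList
      · rw [if_pos (hS.mpr ⟨hm, h2⟩)]
        have hl : String.ofList (preC line.toList) = "Status" := (ofList_eq_iff _ _).mpr h2
        rw [hl]
        rw [PySem.Dict.get?_insert_self, PySem.Dict.get?_insert_of_ne _ _ (by decide)]
        exact mkJ_insert_s _ _ _
      · rw [if_neg (by rw [hS]; exact fun h => h2 h.2)]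
        have hl1 : ("Thoughts" : String) ≠ String.ofList (preC line.toList) := by
          intro h; exact h1 ((ofList_eq_iff _ _).mp h.symm ▸ rfl)
        have hl2 : ("Status" : String) ≠ String.ofList (preC line.toList) := by
          intro h; exact h2 ((ofList_eq_iff _ _).mp h.symm ▸ rfl)
        rw [PySem.Dict.get?_insert_of_ne _ _ hl1, PySem.Dict.get?_insert_of_ne _ _ hl2]
  · rw [if_neg (fun h => hm ((isIn_colon line).mp h)),
      if_neg (by rw [hT]; exact fun h => hm h.1), if_neg (by rw [hS]; exact fun h => hm h.1)]

lemma fold_eq (lines : List String) (d : PySem.Dict String String) :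
    lines.foldl stepA (mkJ (d.get? "Thoughts") (d.get? "Status")) =
      mkJ ((lines.foldl stepB d).get? "Thoughts") ((lines.foldl stepB d).get? "Status") := by
  induction lines generalizing d with
  | nil => rfl
  | cons line rest ih =>
    simp only [List.foldl_cons]
    rw [step_eq line d]
    exact ih (stepB d line)

-- ===== VERDICT (by name: the statement is the Claim_ definition above) =====
theorem parse_aer_judgment_spec : Claim_equal_parse_aer_judgment := by
  intro msg _
  unfold Spec_parse_aer_judgment parse_aer_judgment parse_aer_judgment_alt
  show (((PySem.Str.split? msg "\n").getD []).foldl stepA (mkJ none none)).items = _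
  rw [show (mkJ none none) =
      mkJ (PySem.Dict.empty.get? "Thoughts") (PySem.Dict.empty.get? "Status") from rfl]
  rw [fold_eq]
  rfl
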